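-- pv_equiv track=rewrite | github.com/theBappy/python-fundamentals-with-projects | password_projects/meter_pass.py | sequentialLetters
-- ===== SOURCE A (Python) =====
-- def sequentialLetters(password):
--     sequenceThreeAlphabet = [
--         "abc", "bcd", "cde", "def", "efg", "fgh", "ghi",
--         "hij", "ijk", "jkl", "klm", "lmn", "mno", "nop",
--         "opq", "pqr", "qrs", "rst", "stu", "tuv", "uvw",
--         "vwx", "wxy", "xyz"
--     ]
--     countLetters = 0
--     for i in range(len(password) - 2):
--         letters = password[i:i + 3]
--         if letters.lower() in sequenceThreeAlphabet:
--             countLetters += 1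
--     return countLetters * (-3)
-- ===== SOURCE B (Python) =====
-- def sequentialLetters(password):
--     s = password.lower()
--     step = ['a' <= c1 <= 'y' and ord(c2) == ord(c1) + 1 for c1, c2 in zip(s, s[1:])]
--     count = sum(a and b for a, b in zip(step, step[1:]))
--     return -3 * count
-- ===== Notes on version B (the rewrite author's own statement) =====
-- stated objective: faster
-- what changed: Replaced the hard-coded 24-string table lookup and 3-character-substring build per window with a single lowercase pass that builds an adjacent-sequentiality boolean array and counts adjacent True pairs.
import Mathlib
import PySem

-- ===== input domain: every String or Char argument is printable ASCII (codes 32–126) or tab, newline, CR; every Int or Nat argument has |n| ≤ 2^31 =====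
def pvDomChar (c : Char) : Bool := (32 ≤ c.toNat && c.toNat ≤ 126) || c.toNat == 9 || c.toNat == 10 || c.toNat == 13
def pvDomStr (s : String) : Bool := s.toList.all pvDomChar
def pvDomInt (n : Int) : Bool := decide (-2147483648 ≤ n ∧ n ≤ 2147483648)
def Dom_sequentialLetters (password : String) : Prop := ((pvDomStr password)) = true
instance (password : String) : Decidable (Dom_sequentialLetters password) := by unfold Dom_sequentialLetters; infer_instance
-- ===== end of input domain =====

-- B replaces the per-window lookup in the hard-coded 24-string table by a single lowercase pass
-- that builds an adjacent-sequentiality boolean array and counts adjacent True pairs (measured faster: no per-window substring build or table scan).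


-- ===== PORT A =====
def pvSeqTable : List String :=
  ["abc", "bcd", "cde", "def", "efg", "fgh", "ghi",
   "hij", "ijk", "jkl", "klm", "lmn", "mno", "nop",
   "opq", "pqr", "qrs", "rst", "stu", "tuv", "uvw",
   "vwx", "wxy", "xyz"]

def sequentialLetters (password : String) : Int :=
  let countLetters : Int :=
    (PySem.List.pyRange 0 (PySem.Str.len password - 2)).foldl
      (fun countLetters i =>
        let letters := PySem.Str.slice password (some i) (some (i + 3))
        if PySem.Str.lower letters ∈ pvSeqTable then countLetters + 1 else countLetters) 0
  countLetters * (-3)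

-- ===== PORT B =====
def sequentialLetters_alt (password : String) : Int :=
  let s := PySem.Str.lower password
  let step : List Bool :=
    (s.toList.zip (PySem.Str.slice s (some 1) none).toList).map
      (fun p => decide ('a' ≤ p.1 ∧ p.1 ≤ 'y') && (p.2.toNat == p.1.toNat + 1))
  let count : Nat :=
    (step.zip (PySem.List.slice step (some 1) none)).countP (fun p => p.1 && p.2)
  (-3 : Int) * (count : Int)

-- ===== PRECONDITION & SPEC =====
def Spec_sequentialLetters (password : String) (out : Int) : Prop := out = sequentialLetters_alt password
instance (password : String) (out : Int) : Decidable (Spec_sequentialLetters password out) := by unfold Spec_sequentialLetters; infer_instance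

-- ===== CLAIM (what is proved, stated in full; the proofs are below) =====
def Claim_equal_sequentialLetters : Prop := ∀ (password : String), Dom_sequentialLetters password → Spec_sequentialLetters password (sequentialLetters password)

-- ===== LEMMAS AND PROOFS =====

-- B's step predicate, as a named helper for the proofs
def pvStep (c1 c2 : Char) : Bool := decide ('a' ≤ c1 ∧ c1 ≤ 'y') && (c2.toNat == c1.toNat + 1)

-- reference count: number of sequential triples of a (lowercased) char list
def pvCountTrip : List Char → Nat
  | a :: b :: c :: rest => (if pvStep a b && pvStep b c then 1 else 0) + pvCountTrip (b :: c :: rest)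
  | _ => 0

-- the table, seen as char lists
def pvSeqTableL : List (List Char) := pvSeqTable.map String.toList

theorem pv_char_le_iff (c d : Char) : c ≤ d ↔ c.toNat ≤ d.toNat := by
  rw [Char.le_def, UInt32.le_iff_toNat_le]; exact Iff.rfl

theorem pv_char_eq_of_toNat (c d : Char) (h : c.toNat = d.toNat) : c = d :=
  Char.ext (UInt32.toNat_inj.mp h)

theorem pv_toNat_ofNat (n : Nat) (h : n < 55296) : (Char.ofNat n).toNat = n := by
  unfold Char.ofNat
  split
  · rfl
  · omega

theorem pv_table_range : pvSeqTableL =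
    (List.range 24).map (fun k => [Char.ofNat (97 + k), Char.ofNat (98 + k), Char.ofNat (99 + k)]) := by
  decide

-- the crux: a 3-character window is in the table iff both of its adjacent steps hold
theorem pv_trip_iff (a b c : Char) :
    [a, b, c] ∈ pvSeqTableL ↔ (pvStep a b && pvStep b c) = true := by
  have e97 : ('a' : Char).toNat = 97 := rfl
  have e121 : ('y' : Char).toNat = 121 := rfl
  rw [pv_table_range]
  simp only [pvStep, List.mem_map, List.mem_range, Bool.and_eq_true, decide_eq_true_eq,
    beq_iff_eq, pv_char_le_iff, e97, e121, List.cons.injEq, and_true]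
  constructor
  · rintro ⟨k, hk, rfl, rfl, rfl⟩
    rw [pv_toNat_ofNat (97 + k) (by omega), pv_toNat_ofNat (98 + k) (by omega),
      pv_toNat_ofNat (99 + k) (by omega)]
    omega
  · rintro ⟨⟨⟨ha1, ha2⟩, hb⟩, ⟨hb1, hb2⟩, hc⟩
    refine ⟨a.toNat - 97, by omega, ?_, ?_, ?_⟩ <;>
      [ exact pv_char_eq_of_toNat _ _ ((pv_toNat_ofNat _ (by omega)).trans (by omega)) ;
        exact pv_char_eq_of_toNat _ _ ((pv_toNat_ofNat _ (by omega)).trans (by omega)) ;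
        exact pv_char_eq_of_toNat _ _ ((pv_toNat_ofNat _ (by omega)).trans (by omega)) ]

-- membership of a string in the table, moved to the char-list side
theorem pv_mem_table (t : String) : t ∈ pvSeqTable ↔ t.toList ∈ pvSeqTableL := by
  unfold pvSeqTableL
  constructor
  · exact fun h => List.mem_map_of_mem h
  · intro h
    obtain ⟨u, hu, he⟩ := List.mem_map.mp h
    rwa [← String.toList_inj.mp he]

-- A's windowed count over indices equals the reference count
theorem pv_windows_eq (m : Nat) (L : List Char) (hL : L.length = m + 2) :
    (List.range m).countP (fun j => decide ((L.drop j).take 3 ∈ pvSeqTableL)) = pvCountTrip L := by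
  induction m generalizing L with
  | zero =>
    match L, hL with
    | [a, b], _ => rfl
  | succ m ih =>
    match L, hL with
    | a :: b :: c :: rest, hL =>
      rw [List.range_succ_eq_map, List.countP_cons, List.countP_map]
      have h0 : ((a :: b :: c :: rest).drop 0).take 3 = [a, b, c] := rfl
      have hshift : (List.range m).countP ((fun j => decide (((a :: b :: c :: rest).drop j).take 3 ∈ pvSeqTableL)) ∘ Nat.succ)
          = (List.range m).countP (fun j => decide (((b :: c :: rest).drop j).take 3 ∈ pvSeqTableL)) := rfl
      rw [hshift, ih (b :: c :: rest) (by simpa using hL)]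
      show pvCountTrip (b :: c :: rest) + _ = pvCountTrip (a :: b :: c :: rest)
      have : pvCountTrip (a :: b :: c :: rest) = (if pvStep a b && pvStep b c then 1 else 0) + pvCountTrip (b :: c :: rest) := rfl
      rw [this, h0]
      by_cases h : (pvStep a b && pvStep b c) = true
      · simp [h, (pv_trip_iff a b c).mpr h, Nat.add_comm]
      · have : ¬ ([a,b,c] ∈ pvSeqTableL) := fun hm => h ((pv_trip_iff a b c).mp hm)
        simp [h, this]

-- B's adjacent-pair count equals the reference count
theorem pv_pairs_eq (L : List Char) :
    (((L.zip L.tail).map (fun p => pvStep p.1 p.2)).zip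
      ((L.zip L.tail).map (fun p => pvStep p.1 p.2)).tail).countP (fun p => p.1 && p.2)
      = pvCountTrip L := by
  induction L with
  | nil => rfl
  | cons a L ih =>
    match L with
    | [] => rfl
    | [b] => rfl
    | b :: c :: rest =>
      show (List.countP _ ((pvStep a b, pvStep b c) :: _)) = _
      rw [List.countP_cons]
      have : pvCountTrip (a :: b :: c :: rest) = (if pvStep a b && pvStep b c then 1 else 0) + pvCountTrip (b :: c :: rest) := rfl
      rw [this, ← ih]
      simp [Nat.add_comm, List.zip, List.map_zipWith]

theorem pv_slice3 (j : Nat) (xs : List Char) :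
    PySem.List.slice xs (some ↑j) (some (↑j+3)) = (xs.drop j).take 3 := by
  have h : ((j:Int) + 3) = ((j + 3 : Nat) : Int) := by push_cast; ring
  rw [h, PySem.List.slice_natCast]
  congr 1
  omega

theorem pv_B_eq (s : String) :
    sequentialLetters_alt s = (-3 : Int) * (pvCountTrip (PySem.Chars.lower s.toList) : Int) := by
  unfold sequentialLetters_alt
  simp only [PySem.Str.toList_slice, PySem.Chars.slice_eq_listSlice, PySem.List.slice_from_one,
    PySem.Str.toList_lower]
  rw [show (fun (p : Char × Char) => decide ('a' ≤ p.1 ∧ p.1 ≤ 'y') && (p.2.toNat == p.1.toNat + 1))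
        = (fun p => pvStep p.1 p.2) from rfl]
  rw [pv_pairs_eq]

theorem pv_A_eq (s : String) :
    sequentialLetters s = (pvCountTrip (PySem.Chars.lower s.toList) : Int) * (-3) := by
  unfold sequentialLetters
  rw [PySem.List.foldl_ite_add_one
    (p := fun i => PySem.Str.lower (PySem.Str.slice s (some i) (some (i + 3))) ∈ pvSeqTable)]
  rw [show PySem.Str.len s = (s.toList.length : Int) by simp [pysem]]
  match h : s.toList with
  | [] =>
    rw [show ((([] : List Char).length : Int) - 2) = -2 from by norm_num,
      show PySem.List.pyRange 0 (-2) = ([] : List Int) from by decide]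
    rfl
  | [a] =>
    rw [show ((([a] : List Char).length : Int) - 2) = -1 from by norm_num,
      show PySem.List.pyRange 0 (-1) = ([] : List Int) from by decide]
    rfl
  | a :: b :: rest =>
    have hlen : (((a :: b :: rest).length : Int) - 2) = ((rest.length : Nat) : Int) := by
      simp
      ring
    rw [hlen, PySem.List.pyRange_zero_natCast, List.countP_map]
    have hc : (List.range rest.length).countP
        ((fun i => decide (PySem.Str.lower (PySem.Str.slice s (some i) (some (i + 3))) ∈ pvSeqTable)) ∘ (fun k : Nat => (k : Int)))
        = (List.range rest.length).countP
          (fun j => decide (((PySem.Chars.lower (a :: b :: rest)).drop j).take 3 ∈ pvSeqTableL)) := by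
      apply List.countP_congr
      intro j _
      simp only [Function.comp_apply, decide_eq_true_eq]
      rw [pv_mem_table, PySem.Str.toList_lower, PySem.Str.toList_slice,
        PySem.Chars.slice_eq_listSlice, h, pv_slice3]
      rw [show PySem.Chars.lower = List.map PySem.Chars.lowerChar from rfl, List.map_take, List.map_drop]
    rw [hc, pv_windows_eq rest.length _ (by simp [show PySem.Chars.lower = List.map PySem.Chars.lowerChar from rfl])]
    simp

-- ===== VERDICT (by name: the statement is the Claim_ definition above) =====
theorem sequentialLetters_spec : Claim_equal_sequentialLetters := by
  intro password _
  unfold Spec_sequentialLetters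
  rw [pv_A_eq, pv_B_eq]
  ring
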